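-- pv_equiv track=rewrite | github.com/woletee/1D_ARC | src/backend/genetic_algorithm.py | move_3p
-- ===== SOURCE A (Python) =====
-- def move_3p(arr):
--     if not arr:
--         return arr
--     n = len(arr)
--     new_arr = [0] * n
--     for i in range(n):
--         if arr[i] != 0:
--             new_position = i + 3  # Changed from +2 to +3
--             if new_position < n:
--                 new_arr[new_position] = arr[i]
--     return new_arr
-- ===== SOURCE B (Python) =====
-- def move_3p(arr):
--     n = len(arr)
--     return [0] * min(n, 3) + arr[:max(0, n - 3)]
-- ===== Notes on version B (the rewrite author's own statement) =====
-- stated objective: simpler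
-- what changed: Replaces the per-index loop with a nonzero guard and conditional writes by a single bulk construction: min(n,3) leading zeros followed by the slice arr[:n-3], since zero elements map to zeros anyway.
import Mathlib
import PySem

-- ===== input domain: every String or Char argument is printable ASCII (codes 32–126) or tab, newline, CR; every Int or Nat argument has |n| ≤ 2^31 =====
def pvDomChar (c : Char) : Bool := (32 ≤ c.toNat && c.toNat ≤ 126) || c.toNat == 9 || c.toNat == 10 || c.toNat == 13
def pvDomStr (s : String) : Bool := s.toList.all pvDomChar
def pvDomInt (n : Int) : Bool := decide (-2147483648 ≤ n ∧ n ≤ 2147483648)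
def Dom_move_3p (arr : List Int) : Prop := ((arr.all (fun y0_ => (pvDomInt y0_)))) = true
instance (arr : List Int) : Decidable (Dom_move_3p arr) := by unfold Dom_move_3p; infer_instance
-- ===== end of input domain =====

-- B replaces A's per-index loop (nonzero guard + conditional write) by one bulk construction:
-- min(n,3) leading zeros ++ arr[:n-3]; same output, simpler.

-- ===== PORT A =====
-- loop body of A; arr[i] read via pyGet? (exact: every i drawn from range(n) is in range, so getD 0 never fires)
def move_3p_step (arr : List Int) (n : Int) (new_arr : List Int) (i : Int) : List Int :=
  if (PySem.List.pyGet? arr i).getD 0 ≠ 0 then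
    if i + 3 < n then new_arr.set (i + 3).natAbs ((PySem.List.pyGet? arr i).getD 0)
    else new_arr
  else new_arr

def move_3p (arr : List Int) : List Int :=
  if arr = [] then arr
  else
    let n : Int := arr.length
    (PySem.List.pyRange 0 n 1).foldl (move_3p_step arr n) (List.replicate arr.length 0)

-- ===== PORT B =====
def move_3p_alt (arr : List Int) : List Int :=
  let n := arr.length
  List.replicate (min n 3) 0 ++ PySem.List.slice arr none (some (max 0 ((n : Int) - 3)))

-- ===== PRECONDITION & SPEC =====
def Spec_move_3p (arr : List Int) (out : List Int) : Prop := out = move_3p_alt arr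
instance (arr : List Int) (out : List Int) : Decidable (Spec_move_3p arr out) := by unfold Spec_move_3p; infer_instance

-- ===== CLAIM (what is proved, stated in full; the proofs are below) =====
def Claim_equal_move_3p : Prop := ∀ (arr : List Int), Dom_move_3p arr → Spec_move_3p arr (move_3p arr)

-- ===== LEMMAS AND PROOFS =====

-- setting just past a prefix of known length
lemma set_append_cons (pre : List Int) (x v : Int) (rest : List Int) :
    (pre ++ x :: rest).set pre.length v = pre ++ v :: rest := by
  induction pre with
  | nil => simp
  | cons a t ih => simp [ih]

-- steps with i ≥ n - 3 do nothing
lemma step_id (arr : List Int) (n i : Int) (hi : n ≤ i + 3) (acc : List Int) :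
    move_3p_step arr n acc i = acc := by
  unfold move_3p_step
  split_ifs with h1 h2 <;> first | omega | rfl

-- invariant: after the first m iterations (m ≤ n-3), the first 3 slots are zero,
-- the next m slots are arr.take m, the rest still zero
lemma loop_prefix (arr : List Int) (m : Nat) (hm : m + 3 ≤ arr.length) :
    (PySem.List.pyRange 0 (m : Int) 1).foldl (move_3p_step arr arr.length)
        (List.replicate arr.length 0)
      = List.replicate 3 0 ++ arr.take m ++ List.replicate (arr.length - 3 - m) 0 := by
  induction m with
  | zero =>
      simp [PySem.List.pyRange_one_eq_nil]
      rw [show arr.length = 3 + (arr.length - 3 - 0) by omega, List.replicate_add]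
      simp [List.replicate_succ]
  | succ m ih =>
      have hm' : m + 3 ≤ arr.length := by omega
      rw [show ((m + 1 : Nat) : Int) = (m : Int) + 1 by push_cast; ring,
          PySem.List.pyRange_one_succ_right (by positivity), List.foldl_append,
          ih hm']
      have hget : (PySem.List.pyGet? arr (m : Int)).getD 0 = arr.getD m 0 := by
        simp [PySem.List.pyGet?_natCast, List.getD]
      have hmlt : m < arr.length := by omega
      have htake : arr.take (m + 1) = arr.take m ++ [arr.getD m 0] := by
        rw [List.take_add_one]
        simp [List.getElem?_eq_getElem hmlt, List.getD]
      have hrep : List.replicate (arr.length - 3 - m) (0 : Int)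
          = 0 :: List.replicate (arr.length - 3 - (m + 1)) 0 := by
        rw [show arr.length - 3 - m = (arr.length - 3 - (m+1)) + 1 by omega,
            List.replicate_succ]
      simp only [List.foldl_cons, List.foldl_nil]
      unfold move_3p_step
      rw [hget]
      split_ifs with h1 h2
      · -- nonzero value written at position m + 3
        have hidx : ((m : Int) + 3).natAbs = (List.replicate 3 (0:Int) ++ arr.take m).length := by
          simp [List.length_take]
          omega
        rw [hrep, List.append_assoc, ← List.append_assoc (List.replicate 3 0),
            show ((m : Int) + 3).natAbs = (List.replicate 3 (0:Int) ++ arr.take m).length from hidx,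
            set_append_cons, htake]
        simp
      · omega
      · -- value is zero: the slot already holds 0 = arr[m]
        have h0 : arr.getD m 0 = 0 := by omega
        rw [htake, h0, hrep]
        simp

-- iterations beyond n-3 are identity
lemma loop_tail (arr : List Int) (a : Int) (ha : (arr.length : Int) - 3 ≤ a) (acc : List Int) :
    (PySem.List.pyRange a (arr.length : Int) 1).foldl (move_3p_step arr arr.length) acc = acc := by
  rw [PySem.List.foldl_congr_mem (g := fun acc _ => acc)]
  · exact List.foldl_fixed _
  · intro acc' x hx
    have := (PySem.List.mem_pyRange_one).1 hx
    exact step_id arr _ x (by omega) acc'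

-- ===== VERDICT (by name: the statement is the Claim_ definition above) =====
theorem move_3p_spec : Claim_equal_move_3p := by
  intro arr _
  unfold Spec_move_3p move_3p move_3p_alt
  by_cases hnil : arr = []
  · simp [hnil, PySem.List.slice]
  · simp only [if_neg hnil]
    by_cases hlen : arr.length ≤ 3
    · -- short list: every iteration is identity, result is all zeros
      have : (PySem.List.pyRange 0 (arr.length : Int) 1).foldl
          (move_3p_step arr arr.length) (List.replicate arr.length 0)
          = List.replicate arr.length 0 := by
        simpa using loop_tail arr 0 (by omega) (List.replicate arr.length 0)
      rw [this]
      have hmax : max 0 ((arr.length : Int) - 3) = 0 := by omega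
      rw [hmax]
      rw [PySem.List.slice_to arr le_rfl]
      simp [Nat.min_eq_left hlen]
    · -- long list: split the range at n-3
      rw [not_le] at hlen
      have hsplit : PySem.List.pyRange 0 (arr.length : Int) 1
          = PySem.List.pyRange 0 ((arr.length - 3 : Nat) : Int) 1
            ++ PySem.List.pyRange ((arr.length - 3 : Nat) : Int) (arr.length : Int) 1 := by
        rw [PySem.List.pyRange_one_append] <;> omega
      rw [hsplit, List.foldl_append,
          loop_prefix arr (arr.length - 3) (by omega),
          loop_tail arr _ (by omega)]
      have hmax : max 0 ((arr.length : Int) - 3) = ((arr.length - 3 : Nat) : Int) := by omega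
      rw [hmax, PySem.List.slice_to_natCast]
      have hmin : min arr.length 3 = 3 := by omega
      rw [hmin]
      rw [show arr.length - 3 - (arr.length - 3) = 0 from by omega]
      simp
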